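-- pv_equiv track=rewrite | github.com/rycolab/aclpub2 | aclpub2/templates.py | group_by_last_name
-- ===== SOURCE A (Python) =====
-- from collections import defaultdict
-- from typing import List, Any
--
-- def group_by_last_name(entries) -> List[List[str]]:
--     alphabetized_names = defaultdict(list)
--     for entry in entries:
--         last_name = entry["last_name"]
--         alphabetized_names[last_name[0].lower()].append(entry)
--     output = []
--     letters = list(alphabetized_names.keys())
--     letters.sort()
--     for letter in letters:
--         alphabetized_names[letter].sort(key=lambda x: x["last_name"])
--         output.append(alphabetized_names[letter])
--     return output
-- ===== SOURCE B (Python) =====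
-- def group_by_last_name(entries):
--     letters = sorted({entry["last_name"][0].lower() for entry in entries})
--     return [
--         sorted((e for e in entries if e["last_name"][0].lower() == letter),
--                key=lambda x: x["last_name"])
--         for letter in letters
--     ]
-- ===== Notes on version B (the rewrite author's own statement) =====
-- stated objective: simpler
-- what changed: Replaced the defaultdict bucketing pass plus per-bucket in-place sorts with a sorted set of lowercased initials and one stable per-letter filter-and-sort comprehension (no dict at all).
import Mathlib
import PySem

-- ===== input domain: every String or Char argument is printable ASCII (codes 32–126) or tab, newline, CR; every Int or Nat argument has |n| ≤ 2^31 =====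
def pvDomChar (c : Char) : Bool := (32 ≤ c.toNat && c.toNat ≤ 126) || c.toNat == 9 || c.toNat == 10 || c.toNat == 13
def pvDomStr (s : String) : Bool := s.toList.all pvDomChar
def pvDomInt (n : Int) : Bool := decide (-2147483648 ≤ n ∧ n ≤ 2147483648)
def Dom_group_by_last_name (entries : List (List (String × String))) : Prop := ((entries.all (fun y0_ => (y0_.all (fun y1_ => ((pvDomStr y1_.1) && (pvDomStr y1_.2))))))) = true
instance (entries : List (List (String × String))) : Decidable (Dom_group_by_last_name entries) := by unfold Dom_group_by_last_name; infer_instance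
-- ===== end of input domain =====

-- B replaces A's defaultdict bucketing with a sorted set of initials and a per-letter
-- filter comprehension (simpler decomposition, no dict); same return value on Pre_.


-- shared accessors: entry["last_name"] and entry["last_name"][0].lower()
-- (exact under Pre_group_by_last_name: the key is present and nonempty, so get?/pyGet? succeed)
def pvLast (e : List (String × String)) : String := (PySem.Dict.mk e).getD "last_name" ""
def pvLetter (e : List (String × String)) : String :=
  match PySem.Str.pyGet? (pvLast e) 0 with
  | some c => PySem.Str.lower (String.ofList [c])
  | none => ""

-- ===== PORT A =====
def group_by_last_name (entries : List (List (String × String))) : List (List (List (String × String))) :=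
  -- alphabetized_names = defaultdict(list); for entry: alphabetized_names[letter].append(entry)
  let alphabetized_names : PySem.Dict String (List (List (String × String))) :=
    entries.foldl (fun d e => d.modify (pvLetter e) [] (fun b => b ++ [e])) PySem.Dict.empty
  -- letters = list(keys); letters.sort()
  let letters := PySem.List.sorted alphabetized_names.keys (fun x => x) false
  -- for letter in letters: bucket.sort(key=last_name); output.append(bucket)
  letters.foldl
    (fun out L => out ++ [PySem.List.sorted (alphabetized_names.getD L []) pvLast false]) []

-- ===== PORT B =====
def group_by_last_name_alt (entries : List (List (String × String))) : List (List (List (String × String))) :=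
  -- letters = sorted({entry["last_name"][0].lower() for entry in entries})
  let letters := PySem.List.sorted (PySem.Set.ofList (entries.map pvLetter)) (fun x => x) false
  -- [sorted((e for e in entries if letter matches), key=last_name) for letter in letters]
  letters.map (fun L =>
    PySem.List.sorted (entries.filter (fun e => pvLetter e == L)) pvLast false)

-- ===== PRECONDITION & SPEC =====
-- Pre_ excludes exactly the inputs where Python A raises: an entry without a
-- "last_name" key (KeyError) or with an empty last name (IndexError on [0]).
def Pre_group_by_last_name (entries : List (List (String × String))) : Prop :=
  ∀ e ∈ entries, ((PySem.Dict.mk e).get? "last_name").getD "" ≠ ""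
instance (entries : List (List (String × String))) : Decidable (Pre_group_by_last_name entries) := by
  unfold Pre_group_by_last_name; infer_instance

def pvWitness_group_by_last_name : (List (List (String × String))) :=
  [[("last_name", "Smith")], [("last_name", "adams"), ("x", "y")], [("last_name", "Ab")]]

def Spec_group_by_last_name (entries : List (List (String × String))) (out : List (List (List (String × String)))) : Prop := out = group_by_last_name_alt entries
instance (entries : List (List (String × String))) (out : List (List (List (String × String)))) : Decidable (Spec_group_by_last_name entries out) := by unfold Spec_group_by_last_name; infer_instance

-- ===== CLAIM (what is proved, stated in full; the proofs are below) =====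
def Claim_equal_group_by_last_name : Prop := ∀ (entries : List (List (String × String))), Dom_group_by_last_name entries → Pre_group_by_last_name entries → Spec_group_by_last_name entries (group_by_last_name entries)

-- ===== LEMMAS AND PROOFS =====

-- appending singletons in a fold is a map
theorem foldl_append_singleton {α β : Type} (f : α → β) (ls : List α) (acc : List β) :
    ls.foldl (fun out L => out ++ [f L]) acc = acc ++ ls.map f := by
  induction ls generalizing acc with
  | nil => simp
  | cons x xs ih => simp [List.foldl_cons, ih, List.append_assoc]

-- the bucket of A's dict at letter L is the filter of the input at letter L
theorem bucket_eq_filter (entries : List (List (String × String))) (L : String) :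
    (entries.foldl (fun d e => d.modify (pvLetter e) [] (fun b => b ++ [e]))
        PySem.Dict.empty).getD L []
      = entries.filter (fun e => pvLetter e == L) := by
  have h := PySem.Dict.getD_foldl_modify_append
      (l := entries.map (fun e => (pvLetter e, e)))
      (d := (PySem.Dict.empty : PySem.Dict String (List (List (String × String))))) (c := L)
  rw [List.foldl_map] at h
  simpa [List.filter_map, List.map_map, Function.comp_def] using h

-- the keys of A's dict are the distinct letters in first-occurrence order
theorem keys_eq_ofList (entries : List (List (String × String))) :
    (entries.foldl (fun d e => d.modify (pvLetter e) [] (fun b => b ++ [e]))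
        PySem.Dict.empty).keys
      = PySem.Set.ofList (entries.map pvLetter) := by
  have h := PySem.Dict.keys_foldl_modify_key
      (l := entries) (key := pvLetter) (d0 := ([] : List (List (String × String))))
      (f := fun _ e => (fun b => b ++ [e]))
      (d := (PySem.Dict.empty : PySem.Dict String (List (List (String × String)))))
  simpa [PySem.Set.ofList_eq_foldl, PySem.Set.update, PySem.Dict.keys_empty] using h

-- ===== VERDICT (by name: the statement is the Claim_ definition above) =====
theorem group_by_last_name_spec : Claim_equal_group_by_last_name := by
  intro entries _ _
  unfold Spec_group_by_last_name group_by_last_name group_by_last_name_alt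
  simp only [keys_eq_ofList, foldl_append_singleton, bucket_eq_filter, List.nil_append]
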